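-- pv_equiv track=rewrite | github.com/Fillinit/Working-with-QR | qr_pro/mainapp/views.py | distribute_items
-- ===== SOURCE A (Python) =====
-- import PyPDF2, math, os, json, re
--
-- def distribute_items(number_pm, number_p, num_pages):
--     count_pac = number_pm * number_p
--     items_per_pack = math.ceil(num_pages / count_pac)
--
--     packs = [items_per_pack] * count_pac
--     remaining_items = count_pac * items_per_pack - num_pages
--     for i in range(remaining_items):
--         packs[i] -= 1
--
--     return packs
-- ===== SOURCE B (Python) =====
-- def distribute_items(number_pm, number_p, num_pages):
--     count_pac = number_pm * number_p
--     return [(num_pages + i) // count_pac for i in range(count_pac)]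
-- ===== Notes on version B (the rewrite author's own statement) =====
-- stated objective: alternative
-- what changed: B computes each pack size independently by the closed-form boundary formula (num_pages + i) // count_pac for i in range(count_pac), with no ceiling fill, no decrement loop and no block concatenation; correctness follows because floor((n+i)/c) = q for i < c - (n mod c) and q+1 otherwise.
import Mathlib
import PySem

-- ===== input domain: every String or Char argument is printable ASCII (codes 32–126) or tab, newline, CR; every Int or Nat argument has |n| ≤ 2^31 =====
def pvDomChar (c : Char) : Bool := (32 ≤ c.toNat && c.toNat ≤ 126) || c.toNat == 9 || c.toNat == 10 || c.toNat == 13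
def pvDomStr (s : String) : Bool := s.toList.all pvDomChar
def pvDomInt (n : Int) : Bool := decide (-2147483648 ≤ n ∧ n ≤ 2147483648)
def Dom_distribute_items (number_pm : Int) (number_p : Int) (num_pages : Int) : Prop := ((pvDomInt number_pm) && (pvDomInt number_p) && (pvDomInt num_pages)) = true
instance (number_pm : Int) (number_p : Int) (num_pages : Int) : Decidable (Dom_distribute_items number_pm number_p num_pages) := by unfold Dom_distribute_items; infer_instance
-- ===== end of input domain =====

-- B computes each pack size by the closed-form per-index formula (num_pages + i) // count_pac
-- instead of A's ceiling fill plus decrement loop; return values proved equal whenever count_pac ≠ 0.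

-- ===== PORT A =====
def distribute_items (number_pm : Int) (number_p : Int) (num_pages : Int) : List Int :=
  let count_pac := number_pm * number_p
  -- math.ceil(num_pages / count_pac): ported as the exact ceiling -((-num_pages) // count_pac),
  -- which equals math.ceil of the float quotient for every |num_pages| ≤ 2^31 in Dom
  let items_per_pack := -(PySem.Int.floordiv (-num_pages) count_pac)
  let packs := List.replicate count_pac.toNat items_per_pack
  let remaining_items := count_pac * items_per_pack - num_pages
  (PySem.List.pyRange 0 remaining_items 1).foldl
    (fun ps i => ps.set i.toNat (ps.getD i.toNat 0 - 1)) packs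

-- ===== PORT B =====
def distribute_items_alt (number_pm : Int) (number_p : Int) (num_pages : Int) : List Int :=
  let count_pac := number_pm * number_p
  (PySem.List.pyRange 0 count_pac 1).map
    (fun i => PySem.Int.floordiv (num_pages + i) count_pac)

-- ===== PRECONDITION & SPEC =====
-- Pre_ excludes exactly count_pac = 0, where Python A raises ZeroDivisionError.
def Pre_distribute_items (number_pm : Int) (number_p : Int) (num_pages : Int) : Prop :=
  number_pm * number_p ≠ 0
instance (number_pm : Int) (number_p : Int) (num_pages : Int) : Decidable (Pre_distribute_items number_pm number_p num_pages) := by unfold Pre_distribute_items; infer_instance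

def pvWitness_distribute_items : Int × Int × Int := (2, 3, 20)

def pvRaiseWitness_distribute_items : Int × Int × Int := (0, 1, 5)
def pvRaiseWitnessOut_distribute_items : List Int := []

def Spec_distribute_items (number_pm : Int) (number_p : Int) (num_pages : Int) (out : List Int) : Prop := out = distribute_items_alt number_pm number_p num_pages
instance (number_pm : Int) (number_p : Int) (num_pages : Int) (out : List Int) : Decidable (Spec_distribute_items number_pm number_p num_pages out) := by unfold Spec_distribute_items; infer_instance

-- ===== CLAIM =====
def Claim_equal_distribute_items : Prop := ∀ (number_pm : Int) (number_p : Int) (num_pages : Int), Dom_distribute_items number_pm number_p num_pages → Pre_distribute_items number_pm number_p num_pages → Spec_distribute_items number_pm number_p num_pages (distribute_items number_pm number_p num_pages)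

-- ===== LEMMAS AND PROOFS =====

-- A's decrement loop over range(m) on a uniform list of length c yields the two-block list.
lemma dec_fold (v : Int) (c m : Nat) (hm : m ≤ c) :
    (PySem.List.pyRange 0 (m : Int) 1).foldl
      (fun ps i => ps.set i.toNat (ps.getD i.toNat 0 - 1)) (List.replicate c v)
    = List.replicate m (v - 1) ++ List.replicate (c - m) v := by
  induction m with
  | zero => simp
  | succ m ih =>
    have h1 : ((m : Int) + 1) = ((m + 1 : Nat) : Int) := by push_cast; ring
    have h2 := PySem.List.pyRange_one_succ_right (a := 0) (b := (m : Int)) (by positivity)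
    rw [← h1, h2, List.foldl_append, ih (by omega)]
    have hgetD : (List.replicate m (v - 1) ++ List.replicate (c - m) v).getD m 0 = v := by
      rw [List.getD_eq_getElem?_getD, List.getElem?_append_right (by simp),
        List.length_replicate, Nat.sub_self]
      rw [List.getElem?_replicate, if_pos (by omega)]
      rfl
    have hset : (List.replicate m (v - 1) ++ List.replicate (c - m) v).set m (v - 1)
        = List.replicate (m + 1) (v - 1) ++ List.replicate (c - (m + 1)) v := by
      have hcm : c - m = (c - (m + 1)) + 1 := by omega
      rw [hcm, List.replicate_succ' (n := m), List.replicate_succ (n := c - (m+1)),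
        List.append_assoc, List.set_append_right _ _ (by simp)]
      simp
    simp only [List.foldl_cons, List.foldl_nil, Int.toNat_natCast, hgetD, hset]

-- B's per-index map over range(c) equals the two-block list, where v = ceil(n/c) and
-- mm = c*v - n is the number of decremented packs (0 ≤ mm < c).
lemma map_block (n c v mm : Int) (hc : 0 < c) (hn : n = v * c - mm)
    (h0 : 0 ≤ mm) (h1 : mm < c) :
    (PySem.List.pyRange 0 c 1).map (fun i => PySem.Int.floordiv (n + i) c)
    = List.replicate mm.toNat (v - 1) ++ List.replicate (c.toNat - mm.toNat) v := by
  apply List.ext_getElem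
  · simp [PySem.List.length_pyRange_one]; omega
  · intro k hk hk'
    have hkc : k < c.toNat := by
      simpa [PySem.List.length_pyRange_one] using hk
    rw [List.getElem_map, PySem.List.getElem_pyRange_one]
    by_cases hkm : k < mm.toNat
    · have : PySem.Int.floordiv (n + (0 + (k:Int))) c = v - 1 := by
        rw [PySem.Int.floordiv_eq_iff_of_pos hc]
        constructor <;> [nlinarith [Int.toNat_of_nonneg h0, (by omega : (k:Int) < mm)];
          nlinarith [(by omega : (k:Int) < mm)]]
      rw [this, List.getElem_append_left (by simpa using hkm), List.getElem_replicate]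
    · have : PySem.Int.floordiv (n + (0 + (k:Int))) c = v := by
        rw [PySem.Int.floordiv_eq_iff_of_pos hc]
        constructor <;> [nlinarith [(by omega : mm ≤ (k:Int))];
          nlinarith [(by omega : (k:Int) < c)]]
      rw [this, List.getElem_append_right (by simpa using hkm), List.getElem_replicate]

theorem distribute_items_spec : Claim_equal_distribute_items := by
  intro pm p n _ hpre
  unfold Spec_distribute_items distribute_items distribute_items_alt
  simp only []
  set c := pm * p with hc
  have hc0 : c ≠ 0 := hpre
  have hdm := PySem.Int.floordiv_mul_add_mod (-n) c
  set f := PySem.Int.floordiv (-n) c with hf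
  set mm := PySem.Int.mod (-n) c with hmm
  have hrem : c * (-f) - n = mm := by linarith [hdm]
  rcases lt_or_gt_of_ne hc0 with hneg | hpos
  · -- c < 0 : both sides are []
    have hb := PySem.Int.mod_neg_bounds (a := -n) (h := hneg)
    rw [hrem, PySem.List.pyRange_one_eq_nil (by omega),
      PySem.List.pyRange_one_eq_nil (le_of_lt hneg)]
    simp [(by omega : c.toNat = 0)]
  · -- c > 0
    have hb1 : 0 ≤ mm := PySem.Int.mod_nonneg (a := -n) hpos
    have hb2 : mm < c := PySem.Int.mod_lt (a := -n) hpos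
    rw [hrem]
    have hmc : (mm.toNat : Int) = mm := Int.toNat_of_nonneg hb1
    rw [← hmc, dec_fold (-f) c.toNat mm.toNat (by omega),
      map_block n c (-f) mm hpos (by linarith) hb1 hb2]
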